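-- pv_equiv track=rewrite | github.com/ChileanVirtualObservatory/asydo | src/Line.py | freqWindow
-- ===== SOURCE A (Python) =====
-- def freqWindow(ini,end, freq_axis):
--     """ Frequency window.
--        """
--     idx1=0
--     idx2=len(freq_axis)
--     for i in range(len(freq_axis)):
--         if ini > freq_axis[i]:
--             idx1=i
--         if end < freq_axis[i]:
--             idx2=i
--     return (idx1,idx2)
-- ===== SOURCE B (Python) =====
-- def freqWindow(ini, end, freq_axis):
--     n = len(freq_axis)
--     idx1 = 0
--     for i in range(n - 1, -1, -1):
--         if ini > freq_axis[i]:
--             idx1 = i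
--             break
--     idx2 = n
--     for i in range(n - 1, -1, -1):
--         if end < freq_axis[i]:
--             idx2 = i
--             break
--     return (idx1, idx2)
-- ===== Notes on version B (the rewrite author's own statement) =====
-- stated objective: alternative
-- what changed: Replaces A's single fused forward pass (which overwrites both indices on every match) by two independent reverse scans that each break at the first hit from the end, exploiting that A's answer is the LAST matching index; the early exit makes B measurably faster on random data.
import Mathlib
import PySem

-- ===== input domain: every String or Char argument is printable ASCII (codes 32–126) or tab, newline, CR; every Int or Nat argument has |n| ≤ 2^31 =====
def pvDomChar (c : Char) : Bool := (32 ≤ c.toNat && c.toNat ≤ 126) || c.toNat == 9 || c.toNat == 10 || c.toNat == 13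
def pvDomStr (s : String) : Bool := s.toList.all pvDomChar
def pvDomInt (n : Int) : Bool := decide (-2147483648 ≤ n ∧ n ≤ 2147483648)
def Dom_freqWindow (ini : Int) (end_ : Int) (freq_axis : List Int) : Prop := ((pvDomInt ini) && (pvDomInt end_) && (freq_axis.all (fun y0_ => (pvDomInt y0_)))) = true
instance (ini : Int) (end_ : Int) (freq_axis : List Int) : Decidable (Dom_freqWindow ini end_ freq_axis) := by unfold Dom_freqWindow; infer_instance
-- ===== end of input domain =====

-- B replaces A's fused forward pass by two independent reverse scans with early exit (objective: alternative decomposition).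
-- ===== PORT A =====
-- literal port of A: one forward loop over all indices, overwriting idx1/idx2 on each match
def freqWindow (ini : Int) (end_ : Int) (freq_axis : List Int) : Int × Int :=
  (List.range freq_axis.length).foldl
    (fun (p : Int × Int) (i : Nat) =>
      let v := freq_axis.getD i 0   -- freq_axis[i]; i < len so in range
      ((if ini > v then (i : Int) else p.1),
       (if end_ < v then (i : Int) else p.2)))
    (0, (freq_axis.length : Int))

-- ===== PORT B =====
-- reverse scan: checks index i-1, i-2, …, 0, returning the first (= highest) matching index; none if no match
def scanDown (pred : Int → Bool) (xs : List Int) : Nat → Option Nat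
  | 0 => none
  | i+1 => if pred (xs.getD i 0) then some i else scanDown pred xs i

def freqWindow_alt (ini : Int) (end_ : Int) (freq_axis : List Int) : Int × Int :=
  let n := freq_axis.length
  let idx1 : Int := match scanDown (fun v => ini > v) freq_axis n with
    | some i => (i : Int)
    | none => 0
  let idx2 : Int := match scanDown (fun v => end_ < v) freq_axis n with
    | some i => (i : Int)
    | none => (n : Int)
  (idx1, idx2)

-- ===== PRECONDITION & SPEC =====
def Spec_freqWindow (ini : Int) (end_ : Int) (freq_axis : List Int) (out : Int × Int) : Prop := out = freqWindow_alt ini end_ freq_axis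
instance (ini : Int) (end_ : Int) (freq_axis : List Int) (out : Int × Int) : Decidable (Spec_freqWindow ini end_ freq_axis out) := by unfold Spec_freqWindow; infer_instance

-- ===== CLAIM (what is proved, stated in full; the proofs are below) =====
def Claim_equal_freqWindow : Prop := ∀ (ini : Int) (end_ : Int) (freq_axis : List Int), Dom_freqWindow ini end_ freq_axis → Spec_freqWindow ini end_ freq_axis (freqWindow ini end_ freq_axis)

-- ===== LEMMAS AND PROOFS =====

-- ===== VERDICT (by name: the statement is the Claim_ definition above) =====
-- the fused forward fold equals the pair of reverse early-exit scans (last match = first match from the end)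
theorem foldl_eq_scanDown (ini end_ : Int) (xs : List Int) (n : Nat) (a b : Int) :
    (List.range n).foldl
      (fun (p : Int × Int) (i : Nat) =>
        let v := xs.getD i 0
        ((if ini > v then (i : Int) else p.1),
         (if end_ < v then (i : Int) else p.2)))
      (a, b)
    = ((scanDown (fun v => ini > v) xs n).elim a (fun i => (i : Int)),
       (scanDown (fun v => end_ < v) xs n).elim b (fun i => (i : Int))) := by
  induction n generalizing a b with
  | zero => simp [scanDown]
  | succ n ih =>
    rw [List.range_succ, List.foldl_append, ih]
    simp only [List.foldl_cons, List.foldl_nil, scanDown]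
    by_cases h1 : xs[n]?.getD 0 < ini <;> by_cases h2 : end_ < xs[n]?.getD 0 <;>
      simp [List.getD, h1, h2]

theorem freqWindow_spec : Claim_equal_freqWindow := by
  intro ini end_ xs _
  unfold Spec_freqWindow freqWindow freqWindow_alt
  rw [foldl_eq_scanDown]
  cases h1 : scanDown (fun v => ini > v) xs xs.length <;>
    cases h2 : scanDown (fun v => end_ < v) xs xs.length <;> simp [h1, h2]
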